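-- pv_equiv track=rewrite | github.com/divyavenn/nutramapper_v1 | python_scripts/SQLConnection/data_validation.py | input_form
-- ===== SOURCE A (Python) =====
-- import string
--
-- def input_form(str):
--     name = set(string.ascii_lowercase + string.ascii_uppercase + ',' + string.digits + '%' + '(' + ')' + '-' + ' ')
--     id = set(string.digits + ".")
--     if len(str) == 0:
--         return -2
--     elif all(letter in id for letter in str):
--         return 1
--     elif all(letter in name for letter in str):
--         return 0
--     else:
--         return -1
-- ===== SOURCE B (Python) =====
-- import string
--
-- # Precomputed 128-entry bitmask table: bit 0 = id-character, bit 1 = name-character.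
-- _MASK = [0] * 128
-- for _c in string.digits:
--     _MASK[ord(_c)] = 3
-- _MASK[ord('.')] |= 1
-- for _c in string.ascii_lowercase + string.ascii_uppercase + ",%()- ":
--     _MASK[ord(_c)] |= 2
--
-- def input_form(str):
--     if not str:
--         return -2
--     m = 3
--     for ch in str:
--         o = ord(ch)
--         m &= _MASK[o] if o < 128 else 0
--         if not m:
--             return -1
--     return 1 if m & 1 else 0
-- ===== Notes on version B (the rewrite author's own statement) =====
-- stated objective: alternative
-- what changed: Replaced the staged all(...) membership scans over per-call character sets with a single pass that AND-folds a module-level precomputed 128-entry bitmask table (bit 0 = id-char, bit 1 = name-char) with an early exit once both bits are dead, decoding the final mask into the return code.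
import Mathlib
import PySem

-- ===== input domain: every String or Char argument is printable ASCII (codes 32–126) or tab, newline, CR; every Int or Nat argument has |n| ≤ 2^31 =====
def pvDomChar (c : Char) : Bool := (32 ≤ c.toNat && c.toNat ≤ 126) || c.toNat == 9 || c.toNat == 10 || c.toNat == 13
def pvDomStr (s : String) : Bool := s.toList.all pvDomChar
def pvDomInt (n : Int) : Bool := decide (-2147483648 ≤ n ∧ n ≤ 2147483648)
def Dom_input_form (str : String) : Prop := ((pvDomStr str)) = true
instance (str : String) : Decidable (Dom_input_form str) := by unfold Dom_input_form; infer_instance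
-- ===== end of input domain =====

-- B replaces A's per-call set construction and staged all(...) scans by a single pass over the
-- string, AND-folding a precomputed per-character bitmask table (bit 0 = id, bit 1 = name),
-- with an early exit once both bits are dead (objective: alternative/constant-factor).

-- ===== PORT A =====
def pvLower : List Char := "abcdefghijklmnopqrstuvwxyz".toList
def pvUpper : List Char := "ABCDEFGHIJKLMNOPQRSTUVWXYZ".toList
def pvDigits : List Char := "0123456789".toList

def input_form (str : String) : Int :=
  let name : PySem.Set Char :=
    PySem.Set.ofList (pvLower ++ pvUpper ++ [','] ++ pvDigits ++ ['%'] ++ ['('] ++ [')'] ++ ['-'] ++ [' '])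
  let id : PySem.Set Char := PySem.Set.ofList (pvDigits ++ ['.'])
  if PySem.Str.len str = 0 then -2
  else if str.toList.all (fun letter => PySem.Set.contains id letter) then 1
  else if str.toList.all (fun letter => PySem.Set.contains name letter) then 0
  else -1

-- ===== PORT B =====
-- module-level table built exactly as Source B builds it (replicate, then three update passes)
def pvMaskTable : List Nat :=
  let t := List.replicate 128 0
  let t := pvDigits.foldl (fun t c => t.set c.toNat 3) t
  let t := t.set '.'.toNat (t.getD '.'.toNat 0 ||| 1)
  (pvLower ++ pvUpper ++ ",%()- ".toList).foldl
    (fun t c => t.set c.toNat (t.getD c.toNat 0 ||| 2)) t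

-- `_MASK[o] if o < 128 else 0`
def pvMaskAt (o : Nat) : Nat := if o < 128 then pvMaskTable.getD o 0 else 0

-- the for-loop with its early `return -1` and the final `return 1 if m & 1 else 0`
def pvLoopB : List Char → Nat → Int
  | [], m => if m &&& 1 ≠ 0 then 1 else 0
  | c :: cs, m =>
      let m' := m &&& pvMaskAt c.toNat
      if m' = 0 then -1 else pvLoopB cs m'

def input_form_alt (str : String) : Int :=
  if str.toList.isEmpty then -2
  else pvLoopB str.toList 3

-- ===== PRECONDITION & SPEC =====
def Spec_input_form (str : String) (out : Int) : Prop := out = input_form_alt str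
instance (str : String) (out : Int) : Decidable (Spec_input_form str out) := by unfold Spec_input_form; infer_instance

-- ===== CLAIM (what is proved, stated in full; the proofs are below) =====
def Claim_equal_input_form : Prop := ∀ (str : String), Dom_input_form str → Spec_input_form str (input_form str)

-- ===== LEMMAS AND PROOFS =====

theorem charEq (c d : Char) : (c == d) = (c.toNat == d.toNat) := by
  rcases c with ⟨cv, hc⟩; rcases d with ⟨dv, hd⟩
  simp [Char.ext_iff, UInt32.ext_iff, Char.toNat]

set_option maxRecDepth 10000 in
theorem pvMaskTable_eq : pvMaskTable =
    [0, 0, 0, 0, 0, 0, 0, 0, 0, 0, 0, 0, 0, 0, 0, 0, 0, 0, 0, 0, 0, 0, 0, 0, 0, 0, 0, 0, 0, 0, 0, 0,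
     2, 0, 0, 0, 0, 2, 0, 0, 2, 2, 0, 0, 2, 2, 1, 0, 3, 3, 3, 3, 3, 3, 3, 3, 3, 3, 0, 0, 0, 0, 0, 0,
     0, 2, 2, 2, 2, 2, 2, 2, 2, 2, 2, 2, 2, 2, 2, 2, 2, 2, 2, 2, 2, 2, 2, 2, 2, 2, 2, 0, 0, 0, 0, 0,
     0, 2, 2, 2, 2, 2, 2, 2, 2, 2, 2, 2, 2, 2, 2, 2, 2, 2, 2, 2, 2, 2, 2, 2, 2, 2, 2, 0, 0, 0, 0, 0] := by
  decide

theorem maskbit0 (n : Nat) :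
    (pvMaskAt n).testBit 0 = ((48 ≤ n && n ≤ 57) || n == 46) := by
  by_cases h : n < 128
  · have hb : ∀ m, m < 128 →
        ((if m < 128 then pvMaskTable.getD m 0 else 0).testBit 0
          = ((48 ≤ m && m ≤ 57) || m == 46)) := by
      simp only [pvMaskTable_eq]; decide
    exact hb n h
  · simp only [pvMaskAt, if_neg h, Nat.zero_testBit]
    have h1 : ¬ (n ≤ 57) := by omega
    have h2 : ¬ (n = 46) := by omega
    simp [h1, h2]

theorem maskbit1 (n : Nat) :
    (pvMaskAt n).testBit 1 =
      ((65 ≤ n && n ≤ 90) || (97 ≤ n && n ≤ 122) || (48 ≤ n && n ≤ 57) ||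
        n == 44 || n == 37 || n == 40 || n == 41 || n == 45 || n == 32) := by
  by_cases h : n < 128
  · have hb : ∀ m, m < 128 →
        ((if m < 128 then pvMaskTable.getD m 0 else 0).testBit 1
          = ((65 ≤ m && m ≤ 90) || (97 ≤ m && m ≤ 122) || (48 ≤ m && m ≤ 57) ||
              m == 44 || m == 37 || m == 40 || m == 41 || m == 45 || m == 32)) := by
      simp only [pvMaskTable_eq]; decide
    exact hb n h
  · simp only [pvMaskAt, if_neg h, Nat.zero_testBit]
    have h1 : ¬ (n ≤ 90) := by omega
    have h2 : ¬ (n ≤ 122) := by omega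
    have h3 : ¬ (n ≤ 57) := by omega
    simp [h1, h2, h3]; omega

-- A's set-membership tests, characterised via the mask bits
theorem pvId_char_eq (c : Char) :
    PySem.Set.contains (PySem.Set.ofList (pvDigits ++ ['.'])) c
      = (pvMaskAt c.toNat).testBit 0 := by
  have h : PySem.Set.ofList (pvDigits ++ ['.'])
      = ['0','1','2','3','4','5','6','7','8','9','.'] := by decide
  rw [maskbit0]
  simp only [PySem.Set.contains, h, List.contains_cons, List.contains_nil, charEq]
  rw [Bool.eq_iff_iff]
  simp only [Bool.or_eq_true, Bool.and_eq_true, beq_iff_eq, decide_eq_true_eq]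
  simp only [Char.reduceToNat, Bool.false_eq_true, or_false]
  omega

set_option maxRecDepth 4000 in
theorem pvName_char_eq (c : Char) :
    PySem.Set.contains (PySem.Set.ofList
      (pvLower ++ pvUpper ++ [','] ++ pvDigits ++ ['%'] ++ ['('] ++ [')'] ++ ['-'] ++ [' '])) c
      = (pvMaskAt c.toNat).testBit 1 := by
  have h : PySem.Set.ofList
      (pvLower ++ pvUpper ++ [','] ++ pvDigits ++ ['%'] ++ ['('] ++ [')'] ++ ['-'] ++ [' '])
      = ['a','b','c','d','e','f','g','h','i','j','k','l','m','n','o','p','q','r','s','t','u','v','w','x','y','z','A','B','C','D','E','F','G','H','I','J','K','L','M','N','O','P','Q','R','S','T','U','V','W','X','Y','Z',',','0','1','2','3','4','5','6','7','8','9','%','(',')','-',' '] := by decide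
  rw [maskbit1]
  simp only [PySem.Set.contains, h, List.contains_cons, List.contains_nil, charEq]
  rw [Bool.eq_iff_iff]
  simp only [Bool.or_eq_true, Bool.and_eq_true, beq_iff_eq, decide_eq_true_eq]
  simp only [Char.reduceToNat, Bool.false_eq_true, or_false]
  omega

theorem foldl_and_zero (f : Char → Nat) (l : List Char) :
    l.foldl (fun a c => a &&& f c) 0 = 0 := by
  induction l with
  | nil => rfl
  | cons c cs ih => simpa [Nat.zero_and] using ih

theorem foldl_and_le (f : Char → Nat) (l : List Char) (m : Nat) :
    l.foldl (fun a c => a &&& f c) m ≤ m := by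
  induction l generalizing m with
  | nil => simp
  | cons c cs ih =>
      exact le_trans (ih (m &&& f c)) (Nat.and_le_left)

theorem foldl_and_testBit (f : Char → Nat) (i : Nat) (l : List Char) (m : Nat) :
    (l.foldl (fun a c => a &&& f c) m).testBit i
      = (m.testBit i && l.all fun c => (f c).testBit i) := by
  induction l generalizing m with
  | nil => simp
  | cons c cs ih =>
      simp only [List.foldl_cons, List.all_cons, ih, Nat.testBit_and, Bool.and_assoc]

theorem pvLoopB_eq (l : List Char) (m : Nat) (hm : m ≠ 0) :
    pvLoopB l m =
      (let k := l.foldl (fun a c => a &&& pvMaskAt c.toNat) m;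
       if k = 0 then -1 else if k &&& 1 ≠ 0 then 1 else 0) := by
  induction l generalizing m with
  | nil => simp [pvLoopB, hm]
  | cons c cs ih =>
      simp only [pvLoopB, List.foldl_cons]
      by_cases h0 : m &&& pvMaskAt c.toNat = 0
      · simp [h0, foldl_and_zero]
      · rw [if_neg h0, ih _ h0]; rfl

theorem len_eq_zero_iff (s : String) : PySem.Str.len s = 0 ↔ s.toList.isEmpty := by
  simp [PySem.Str.len_eq]

-- ===== VERDICT (by name: the statement is the Claim_ definition above) =====
theorem input_form_spec : Claim_equal_input_form := by
  intro s _
  unfold Spec_input_form input_form input_form_alt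
  simp only [pvId_char_eq, pvName_char_eq]
  by_cases h0 : s.toList.isEmpty
  · rw [if_pos ((len_eq_zero_iff s).mpr h0), if_pos h0]
  · rw [if_neg (fun h => h0 ((len_eq_zero_iff s).mp h)), if_neg h0]
    rw [pvLoopB_eq _ _ (by decide)]
    have hle := foldl_and_le (fun c => pvMaskAt c.toNat) s.toList 3
    have hb0 := foldl_and_testBit (fun c => pvMaskAt c.toNat) 0 s.toList 3
    have hb1 := foldl_and_testBit (fun c => pvMaskAt c.toNat) 1 s.toList 3
    set k := s.toList.foldl (fun a c => a &&& pvMaskAt c.toNat) 3 with hk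
    simp only [show Nat.testBit 3 0 = true from rfl,
               show Nat.testBit 3 1 = true from rfl, Bool.true_and] at hb0 hb1
    clear_value k
    clear hk
    interval_cases k <;> rw [← hb0, ← hb1] <;> decide
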